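-- pv_equiv track=rewrite | github.com/malgorzatazdunik/AoC2022 | day1.py | count_max_calories_elf
-- ===== SOURCE A (Python) =====
-- def count_max_calories_elf(data):
--     max_sum = 0
--     sum = 0
--     for line in data:
--         try:
--             sum += int(line)
--         except ValueError:
--             if sum > max_sum:
--                 max_sum = sum
--             sum = 0
--
--     if sum > max_sum:
--         max_sum = sum
--     return max_sum
-- ===== SOURCE B (Python) =====
-- def count_max_calories_elf(data):
--     # Prefix-sum / checkpoint algorithm: the running total is NEVER reset.
--     # Record the cumulative total at each separator line; each group's sum is
--     # the difference of two adjacent checkpoints; reduce with a 0 baseline.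
--     checkpoints = [0]
--     total = 0
--     for line in data:
--         try:
--             total += int(line)
--         except ValueError:
--             checkpoints.append(total)
--     checkpoints.append(total)
--     diffs = [b - a for a, b in zip(checkpoints, checkpoints[1:])]
--     return max([0] + diffs)
-- ===== Notes on version B (the rewrite author's own statement) =====
-- stated objective: alternative
-- what changed: Replaces A's fused compare-and-reset state machine (running group sum reset at each separator, max updated inline) with a prefix-sum/checkpoint algorithm: the cumulative total is never reset, it is recorded at every separator, and group sums are recovered afterwards as differences of adjacent checkpoints, reduced by max with a 0 baseline.
import Mathlib
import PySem

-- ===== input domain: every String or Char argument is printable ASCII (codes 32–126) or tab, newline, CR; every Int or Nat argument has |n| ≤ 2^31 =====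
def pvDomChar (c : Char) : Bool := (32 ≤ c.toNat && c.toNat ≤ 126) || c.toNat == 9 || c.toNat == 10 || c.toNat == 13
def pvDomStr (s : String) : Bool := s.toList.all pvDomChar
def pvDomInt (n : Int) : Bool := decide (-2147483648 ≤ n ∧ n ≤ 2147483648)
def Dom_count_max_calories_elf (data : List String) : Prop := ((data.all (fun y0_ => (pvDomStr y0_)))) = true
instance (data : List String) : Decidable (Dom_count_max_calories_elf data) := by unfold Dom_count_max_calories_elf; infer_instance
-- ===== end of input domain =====

-- B replaces A's fused compare-and-reset scan with a prefix-sum/checkpoint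
-- algorithm (cumulative total recorded at separators; group sums = adjacent
-- checkpoint differences, reduced by max with a 0 baseline); objective: alternative.

-- ===== PORT A =====
-- loop body of A: state = (max_sum, sum)
def cmceStepA (p : Int × Int) (line : String) : Int × Int :=
  match PySem.Int.ofStr? line with
  | some n => (p.1, p.2 + n)
  | none => (if p.2 > p.1 then p.2 else p.1, 0)

def count_max_calories_elf (data : List String) : Int :=
  let st := data.foldl cmceStepA (0, 0)
  if st.2 > st.1 then st.2 else st.1

-- ===== PORT B =====
-- loop body of B: state = (checkpoints, total); the total is never reset
def cmceStepB (p : List Int × Int) (line : String) : List Int × Int :=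
  match PySem.Int.ofStr? line with
  | some n => (p.1, p.2 + n)
  | none => (p.1 ++ [p.2], p.2)

def count_max_calories_elf_alt (data : List String) : Int :=
  let st := data.foldl cmceStepB ([0], 0)
  let checkpoints := st.1 ++ [st.2]
  -- zip(checkpoints, checkpoints[1:]); checkpoints[1:] = drop 1 on this in-range slice
  let diffs := (checkpoints.zip (checkpoints.drop 1)).map (fun ab => ab.2 - ab.1)
  match PySem.List.max? ((0 : Int) :: diffs) (fun x => x) with
  | some m => m
  | none => 0   -- unreachable: the list is nonempty

-- ===== PRECONDITION & SPEC =====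
def Spec_count_max_calories_elf (data : List String) (out : Int) : Prop := out = count_max_calories_elf_alt data
instance (data : List String) (out : Int) : Decidable (Spec_count_max_calories_elf data out) := by unfold Spec_count_max_calories_elf; infer_instance

-- ===== CLAIM (what is proved, stated in full; the proofs are below) =====
def Claim_equal_count_max_calories_elf : Prop := ∀ (data : List String), Dom_count_max_calories_elf data → Spec_count_max_calories_elf data (count_max_calories_elf data)

-- ===== LEMMAS AND PROOFS =====

-- adjacent differences of a checkpoint list
def cmceDiffs (l : List Int) : List Int :=
  (l.zip (l.drop 1)).map (fun ab => ab.2 - ab.1)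

theorem cmceDiffs_cons (a b : Int) (l : List Int) :
    cmceDiffs (a :: b :: l) = (b - a) :: cmceDiffs (b :: l) := by
  simp [cmceDiffs]

-- B's checkpoint list is append-only: the seed can be split off
theorem cmceB_acc (lines : List String) (cs : List Int) (t : Int) :
    lines.foldl cmceStepB (cs, t)
      = (cs ++ (lines.foldl cmceStepB ([], t)).1, (lines.foldl cmceStepB ([], t)).2) := by
  induction lines generalizing cs t with
  | nil => simp
  | cons line rest ih =>
    cases h : PySem.Int.ofStr? line with
    | some n => simp only [List.foldl_cons, cmceStepB, h]; exact ih cs (t + n)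
    | none =>
      simp only [List.foldl_cons, cmceStepB, h, List.nil_append]
      rw [ih (cs ++ [t]) t, ih [t] t]
      simp

-- A's flushed result = running max (seeded with m) over the adjacent
-- differences of B's checkpoints, when the fold starts at total c + s with
-- last recorded checkpoint c
theorem cmce_key (lines : List String) (m c s : Int) :
    (let st := lines.foldl cmceStepA (m, s); if st.2 > st.1 then st.2 else st.1)
      = List.foldl max m (cmceDiffs ((c :: (lines.foldl cmceStepB ([], c + s)).1)
          ++ [(lines.foldl cmceStepB ([], c + s)).2])) := by
  induction lines generalizing m c s with
  | nil => simp [cmceDiffs, max_def]; omega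
  | cons line rest ih =>
    cases h : PySem.Int.ofStr? line with
    | some n =>
      simp only [List.foldl_cons, cmceStepA, cmceStepB, h]
      have := ih m c (s + n)
      rw [show c + s + n = c + (s + n) by ring]
      exact this
    | none =>
      simp only [List.foldl_cons, cmceStepA, cmceStepB, h, List.nil_append]
      rw [cmceB_acc rest [c + s] (c + s)]
      simp only [List.cons_append, List.nil_append]
      rw [cmceDiffs_cons]
      simp only [List.foldl_cons]
      have := ih (if s > m then s else m) (c + s) 0
      rw [show c + s + 0 = c + s by ring] at this
      rw [show max m (c + s - c) = (if s > m then s else m) by simp [max_def]; omega]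
      exact this

-- ===== VERDICT (by name: the statement is the Claim_ definition above) =====
theorem count_max_calories_elf_spec : Claim_equal_count_max_calories_elf := by
  intro data _
  show count_max_calories_elf data = count_max_calories_elf_alt data
  unfold count_max_calories_elf count_max_calories_elf_alt
  have hk := cmce_key data 0 0 0
  rw [show (0 : Int) + 0 = 0 from rfl] at hk
  rw [cmceB_acc data [0] 0]
  simp only [List.cons_append, List.nil_append]
  rw [PySem.List.max?_id_cons, hk]
  simp only [cmceDiffs, List.cons_append] at *
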